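-- pv_equiv track=rewrite | github.com/Andrenator/text-blackout-generator | mainv2.py | replace_words_in_text
-- ===== SOURCE A (Python) =====
-- def replace_words_in_text(input_string, found_words):
--     found_words = sorted(found_words, key=lambda x: x[1])
--     result = []
--     last_index = 0
--
--     for word, start, end in found_words:
--         left = input_string[:start]
--         right = input_string[end:]
--
--         while len(left) > 0 and left[-1] != " ":
--             left = left[:-1]
--
--         while len(right) > 0 and right[0] != " ":
--             right = right[1:]
--
--         result.append(left)
--         result.append(f"({word})")
--         result.append(right)
--         result.append("\n")
--
--     return ''.join(result)
-- ===== SOURCE B (Python) =====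
-- # B: instead of stripping characters one at a time (re-slicing at every step), cut each
-- # side at the nearest space with a single rfind/find call.
--
-- def replace_words_in_text(input_string, found_words):
--     lines = []
--     for word, start, end in sorted(found_words, key=lambda x: x[1]):
--         left = input_string[:start]
--         left = left[:left.rfind(" ") + 1]
--         right = input_string[end:]
--         j = right.find(" ")
--         right = right[j:] if j >= 0 else ""
--         lines.append(f"{left}({word}){right}\n")
--     return "".join(lines)
-- ===== Notes on version B (the rewrite author's own statement) =====
-- stated objective: faster
-- what changed: Replaces the per-word character-by-character left/right stripping while-loops (each step copying a fresh slice, quadratic in the stripped length) with a single rfind/find call per side that cuts the slice at the nearest space directly.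
import Mathlib
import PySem

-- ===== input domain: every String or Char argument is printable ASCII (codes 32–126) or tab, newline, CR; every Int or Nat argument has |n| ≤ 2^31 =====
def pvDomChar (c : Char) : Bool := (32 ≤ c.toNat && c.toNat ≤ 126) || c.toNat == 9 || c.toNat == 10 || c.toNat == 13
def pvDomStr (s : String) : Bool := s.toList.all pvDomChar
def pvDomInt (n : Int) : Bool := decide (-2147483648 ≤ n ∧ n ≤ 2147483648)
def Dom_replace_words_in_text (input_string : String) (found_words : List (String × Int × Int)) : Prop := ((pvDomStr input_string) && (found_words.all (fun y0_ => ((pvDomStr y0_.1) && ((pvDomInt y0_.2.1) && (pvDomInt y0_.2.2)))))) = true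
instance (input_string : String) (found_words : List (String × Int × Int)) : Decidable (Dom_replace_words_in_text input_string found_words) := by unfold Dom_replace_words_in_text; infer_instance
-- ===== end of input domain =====

-- B replaces A's per-word character-by-character stripping while-loops by one rfind/find
-- call per side that cuts the slice at the nearest space (objective: faster).

-- ===== PORT A =====
-- while len(left) > 0 and left[-1] != " ": left = left[:-1]
-- (left[:-1] is List.dropLast, see PySem.List.slice_to_neg_one)
def pvTrimR (l : List Char) : List Char :=
  if _h : 0 < l.length ∧ ¬ (PySem.List.pyGetD l (-1) ' ' = ' ') then pvTrimR l.dropLast else l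
termination_by l.length
decreasing_by simp [List.length_dropLast]; omega

-- while len(right) > 0 and right[0] != " ": right = right[1:]
-- (right[1:] is List.tail, see PySem.List.slice_from_one)
def pvTrimL (l : List Char) : List Char :=
  if _h : 0 < l.length ∧ ¬ (PySem.List.pyGetD l 0 ' ' = ' ') then pvTrimL l.tail else l
termination_by l.length
decreasing_by simp [List.length_tail]; omega

-- (A's variable last_index = 0 is never used and is omitted)
def replace_words_in_text (input_string : String) (found_words : List (String × Int × Int)) : String :=
  let cs := input_string.toList
  let fw := PySem.List.sorted found_words (fun x => x.2.1)
  let result : List (List Char) := fw.foldl (fun acc t =>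
    let left := pvTrimR (PySem.List.slice cs none (some t.2.1))
    let right := pvTrimL (PySem.List.slice cs (some t.2.2) none)
    acc ++ [left] ++ [('(' :: t.1.toList) ++ [')']] ++ [right] ++ [['\n']]) []
  String.ofList (PySem.Chars.join [] result)

-- ===== PORT B =====
def replace_words_in_text_alt (input_string : String) (found_words : List (String × Int × Int)) : String :=
  let cs := input_string.toList
  let lines : List (List Char) := (PySem.List.sorted found_words (fun x => x.2.1)).foldl (fun acc t =>
    let left0 := PySem.List.slice cs none (some t.2.1)
    let left := PySem.List.slice left0 none (some (PySem.Chars.rfind left0 [' '] + 1))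
    let right0 := PySem.List.slice cs (some t.2.2) none
    let j := PySem.Chars.find right0 [' ']
    let right := if 0 ≤ j then PySem.List.slice right0 (some j) none else []
    acc ++ [left ++ (('(' :: t.1.toList) ++ [')']) ++ right ++ ['\n']]) []
  String.ofList (PySem.Chars.join [] lines)

-- ===== PRECONDITION & SPEC =====
def Spec_replace_words_in_text (input_string : String) (found_words : List (String × Int × Int)) (out : String) : Prop := out = replace_words_in_text_alt input_string found_words
instance (input_string : String) (found_words : List (String × Int × Int)) (out : String) : Decidable (Spec_replace_words_in_text input_string found_words out) := by unfold Spec_replace_words_in_text; infer_instance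

-- ===== CLAIM (what is proved, stated in full; the proofs are below) =====
def Claim_equal_replace_words_in_text : Prop := ∀ (input_string : String) (found_words : List (String × Int × Int)), Dom_replace_words_in_text input_string found_words → Spec_replace_words_in_text input_string found_words (replace_words_in_text input_string found_words)

-- ===== LEMMAS AND PROOFS =====

-- [' '] is a prefix of l.drop i exactly when position i of l is a space
lemma pvPrefixSingle (l : List Char) (i : Nat) :
    [' '] <+: l.drop i ↔ ∃ h : i < l.length, l[i] = ' ' := by
  constructor
  · rintro ⟨t, ht⟩
    have hi : i < l.length := by
      by_contra hc
      rw [List.drop_eq_nil_of_le (by omega)] at ht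
      simp at ht
    refine ⟨hi, ?_⟩
    rw [List.drop_eq_getElem_cons hi] at ht
    exact (List.cons_eq_cons.mp ht).1.symm
  · rintro ⟨hi, hsp⟩
    rw [List.drop_eq_getElem_cons hi, hsp]
    exact ⟨l.drop (i + 1), rfl⟩
lemma pvTrimR_nil : pvTrimR [] = [] := by rw [pvTrimR]; simp

lemma pvTrimL_nil : pvTrimL [] = [] := by rw [pvTrimL]; simp

lemma pvTrimR_append (l : List Char) (c : Char) :
    pvTrimR (l ++ [c]) = if c = ' ' then l ++ [c] else pvTrimR l := by
  rw [pvTrimR]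
  by_cases hc : c = ' ' <;>
    simp [hc, PySem.List.pyGetD_neg_one_append_singleton]

lemma pvTrimL_cons (c : Char) (l : List Char) :
    pvTrimL (c :: l) = if c = ' ' then c :: l else pvTrimL l := by
  rw [pvTrimL]
  by_cases hc : c = ' ' <;> simp [hc, PySem.List.pyGetD_zero_cons]

-- find is the unique first occurrence
lemma pvFindEq (l sub : List Char) (j : Nat) (hp : sub <+: l.drop j)
    (hmin : ∀ i, i < j → ¬ sub <+: l.drop i) : PySem.Chars.find l sub = (j : Int) := by
  have hin : PySem.Chars.isIn sub l = true :=
    (PySem.Chars.exists_prefix_drop_iff_isIn _ _).mp ⟨j, hp⟩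
  have hnn : 0 ≤ PySem.Chars.find l sub :=
    (PySem.Chars.find_nonneg_iff _ _).mpr ((PySem.Chars.isIn_iff_infix _ _).mp hin)
  obtain ⟨h1, h2⟩ := PySem.Chars.find_spec hnn
  rcases Nat.lt_trichotomy (PySem.Chars.find l sub).toNat j with hlt | heq | hgt
  · exact absurd h1 (hmin _ hlt)
  · omega
  · exact absurd hp (h2 j hgt)

lemma pvFindCons (c : Char) (l : List Char) (hc : ¬ c = ' ') :
    PySem.Chars.find (c :: l) [' ']
      = if PySem.Chars.find l [' '] = -1 then -1 else PySem.Chars.find l [' '] + 1 := by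
  by_cases hl : PySem.Chars.find l [' '] = -1
  · rw [if_pos hl]
    have hnil : ¬ [' '] <:+: l := (PySem.Chars.find_eq_neg_one_iff _ _).mp hl
    apply (PySem.Chars.find_eq_neg_one_iff _ _).mpr
    intro hinf
    obtain ⟨j, hp⟩ := (PySem.Chars.exists_prefix_drop_iff_isIn _ _).mpr
      ((PySem.Chars.isIn_iff_infix _ _).mpr hinf)
    cases j with
    | zero =>
      obtain ⟨hj, hsp⟩ := (pvPrefixSingle _ 0).mp hp
      simp at hsp
      exact hc hsp
    | succ j =>
      have : [' '] <+: l.drop j := by simpa using hp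
      exact hnil ((PySem.Chars.isIn_iff_infix _ _).mp
        ((PySem.Chars.exists_prefix_drop_iff_isIn _ _).mp ⟨j, this⟩))
  · rw [if_neg hl]
    have hnn : 0 ≤ PySem.Chars.find l [' '] := by
      have := PySem.Chars.neg_one_le_find (s := l) (sub := [' '])
      omega
    obtain ⟨h1, h2⟩ := PySem.Chars.find_spec hnn
    have := pvFindEq (c :: l) [' '] ((PySem.Chars.find l [' ']).toNat + 1)
      (by simpa using h1)
      (by
        intro i hi
        cases i with
        | zero =>
          intro hp
          obtain ⟨hj, hsp⟩ := (pvPrefixSingle _ 0).mp hp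
          simp at hsp
          exact hc hsp
        | succ i =>
          intro hp
          exact h2 i (by omega) (by simpa using hp))
    rw [this]
    omega

-- pvTrimL strips to the first space, i.e. to find(' ')
lemma pvTrimL_eq (l : List Char) :
    pvTrimL l = if 0 ≤ PySem.Chars.find l [' ']
      then l.drop (PySem.Chars.find l [' ']).toNat else [] := by
  induction l with
  | nil =>
    have : PySem.Chars.find ([] : List Char) [' '] = -1 := by decide
    rw [pvTrimL_nil, this]
    simp
  | cons c l ih =>
    rw [pvTrimL_cons]
    by_cases hc : c = ' '
    · have h0 : PySem.Chars.find (c :: l) [' '] = (0 : Int) := by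
        apply pvFindEq _ _ 0
        · simp [hc]
        · omega
      rw [if_pos hc, h0]
      simp
    · rw [if_neg hc, pvFindCons c l hc, ih]
      by_cases hl : PySem.Chars.find l [' '] = -1
      · rw [if_pos hl, hl]
        simp
      · have hnn : 0 ≤ PySem.Chars.find l [' '] := by
          have := PySem.Chars.neg_one_le_find (s := l) (sub := [' '])
          omega
        rw [if_neg hl, if_pos hnn, if_pos (by omega)]
        have : (PySem.Chars.find l [' '] + 1).toNat = (PySem.Chars.find l [' ']).toNat + 1 := by
          omega
        rw [this, List.drop_succ_cons]

-- every result of rfind.go is -1 or an occurrence index ≤ k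
lemma pvRfindGoCases (s : List Char) (k : Nat) :
    PySem.Chars.rfind.go s [' '] k = -1 ∨
      ∃ i : Nat, i ≤ k ∧ PySem.Chars.rfind.go s [' '] k = (i : Int) ∧ [' '] <+: s.drop i := by
  induction k with
  | zero =>
    rw [PySem.Chars.rfind.go]
    by_cases h : [' '].isPrefixOf s = true
    · exact Or.inr ⟨0, le_rfl, by simp [h], by simpa using (List.isPrefixOf_iff_prefix.mp h)⟩
    · simp [h]
  | succ k ih =>
    rw [PySem.Chars.rfind.go]
    by_cases h : [' '].isPrefixOf (s.drop (k + 1)) = true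
    · exact Or.inr ⟨k + 1, le_rfl, by simp [h], List.isPrefixOf_iff_prefix.mp h⟩
    · simp only [h, if_false]
      rcases ih with h1 | ⟨i, hi, he, hp⟩
      · exact Or.inl h1
      · exact Or.inr ⟨i, by omega, he, hp⟩

-- below the final element, rfind.go ignores an appended character
lemma pvRfindGoAppend (l : List Char) (c : Char) (k : Nat) (hk : k < l.length) :
    PySem.Chars.rfind.go (l ++ [c]) [' '] k = PySem.Chars.rfind.go l [' '] k := by
  induction k with
  | zero =>
    rw [PySem.Chars.rfind.go, PySem.Chars.rfind.go]
    have : [' '].isPrefixOf (l ++ [c]) = [' '].isPrefixOf l := by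
      apply Bool.eq_iff_iff.mpr
      rw [List.isPrefixOf_iff_prefix, List.isPrefixOf_iff_prefix]
      have h1 := pvPrefixSingle (l ++ [c]) 0
      have h2 := pvPrefixSingle l 0
      simp only [List.drop_zero] at h1 h2
      rw [h1, h2]
      constructor
      · rintro ⟨hj, hsp⟩
        exact ⟨hk.trans_le (by omega) |>.trans_le le_rfl, by
          rw [List.getElem_append_left hk] at hsp; exact hsp⟩
      · rintro ⟨hj, hsp⟩
        exact ⟨by simp, by rw [List.getElem_append_left hk]; exact hsp⟩
    rw [this]
  | succ k ih =>
    rw [PySem.Chars.rfind.go, PySem.Chars.rfind.go]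
    have : [' '].isPrefixOf ((l ++ [c]).drop (k + 1)) = [' '].isPrefixOf (l.drop (k + 1)) := by
      apply Bool.eq_iff_iff.mpr
      rw [List.isPrefixOf_iff_prefix, List.isPrefixOf_iff_prefix,
        pvPrefixSingle, pvPrefixSingle]
      constructor
      · rintro ⟨hj, hsp⟩
        refine ⟨hk, ?_⟩
        rwa [List.getElem_append_left hk] at hsp
      · rintro ⟨hj, hsp⟩
        refine ⟨by simp; omega, ?_⟩
        rw [List.getElem_append_left hk]
        exact hsp
    rw [this]
    by_cases h : [' '].isPrefixOf (l.drop (k + 1)) = true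
    · simp [h]
    · simp only [h, if_false]
      exact ih (by omega)

-- rfind(' ') on l ++ [c]: the appended char if it is a space, else rfind on l
lemma pvRfindAppend (l : List Char) (c : Char) :
    PySem.Chars.rfind (l ++ [c]) [' ']
      = if c = ' ' then (l.length : Int) else PySem.Chars.rfind l [' '] := by
  unfold PySem.Chars.rfind
  have hlen : (l ++ [c]).length = l.length + 1 := by simp
  rw [hlen]
  rw [PySem.Chars.rfind.go]
  have hnil : [' '].isPrefixOf ((l ++ [c]).drop (l.length + 1)) = false := by
    rw [List.drop_eq_nil_of_le (by simp)]
    rfl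
  simp only [hnil, if_false, Bool.false_eq_true]
  cases hl : l.length with
  | zero =>
    have hl0 : l = [] := List.eq_nil_of_length_eq_zero hl
    subst hl0
    rw [PySem.Chars.rfind.go]
    simp only [List.nil_append, List.drop_zero, List.length_nil]
    rw [PySem.Chars.rfind.go]
    by_cases hc : c = ' '
    · subst hc
      simp [List.isPrefixOf]
    · have : [' '].isPrefixOf [c] = false := by
        simp [List.isPrefixOf, hc]
        intro h; exact absurd h.symm hc
      simp [this, hc]
  | succ m =>
    rw [PySem.Chars.rfind.go]
    have hdrop : (l ++ [c]).drop (m + 1) = [c] := by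
      rw [List.drop_append_of_le_length (by omega), List.drop_eq_nil_of_le (by omega)]
      simp
    rw [hdrop]
    by_cases hc : c = ' '
    · subst hc
      simp [List.isPrefixOf, hl]
    · have hpc : [' '].isPrefixOf [c] = false := by
        simp [List.isPrefixOf]
        intro h; exact absurd h.symm hc
      simp only [hpc, if_neg hc, Bool.false_eq_true, if_false]
      rw [pvRfindGoAppend l c m (by omega)]
      conv_rhs => rw [PySem.Chars.rfind.go]
      have : [' '].isPrefixOf (l.drop (m + 1)) = false := by
        rw [List.drop_eq_nil_of_le (by omega)]
        rfl
      rw [hl, this] at *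
      simp

-- pvTrimR keeps everything up to and including the last space, i.e. up to rfind(' ')+1
lemma pvTrimR_eq (l : List Char) :
    pvTrimR l = l.take (PySem.Chars.rfind l [' '] + 1).toNat := by
  induction l using List.reverseRecOn with
  | nil =>
    have : PySem.Chars.rfind ([] : List Char) [' '] = -1 := by decide
    rw [pvTrimR_nil, this]
    simp
  | append_singleton l c ih =>
    rw [pvTrimR_append, pvRfindAppend]
    by_cases hc : c = ' '
    · rw [if_pos hc, if_pos hc]
      have : ((l.length : Int) + 1).toNat = l.length + 1 := by omega
      rw [this, List.take_of_length_le (by simp)]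
    · rw [if_neg hc, if_neg hc, ih]
      rcases pvRfindGoCases l l.length with h1 | ⟨i, hi, he, hp⟩
      · unfold PySem.Chars.rfind at *
        rw [h1]
        simp
      · unfold PySem.Chars.rfind at *
        rw [he]
        obtain ⟨hilen, _⟩ := (pvPrefixSingle l i).mp hp
        rw [List.take_append_of_le_length (by omega)]

-- helper facts about in-range slices
lemma pvClampEq (n : Nat) (b : Int) (h0 : 0 ≤ b) (h1 : b ≤ (n : Int)) :
    PySem.List.clampIdx n b = b.toNat := by
  simp only [PySem.List.clampIdx]
  split_ifs <;> omega

lemma pvSliceTake (cs : List Char) (b : Int) (h0 : 0 ≤ b) (h1 : b ≤ (cs.length : Int)) :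
    PySem.List.slice cs none (some b) = cs.take b.toNat := by
  simp [PySem.List.slice, pvClampEq cs.length b h0 h1]

lemma pvSliceDrop (cs : List Char) (b : Int) (h0 : 0 ≤ b) (h1 : b ≤ (cs.length : Int)) :
    PySem.List.slice cs (some b) none = cs.drop b.toNat := by
  simp only [PySem.List.slice, pvClampEq cs.length b h0 h1]
  rw [List.take_of_length_le (by simp)]

-- the two per-entry identities
lemma pvLeft_eq (left0 : List Char) :
    pvTrimR left0
      = PySem.List.slice left0 none (some (PySem.Chars.rfind left0 [' '] + 1)) := by
  have hb : -1 ≤ PySem.Chars.rfind left0 [' '] ∧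
      PySem.Chars.rfind left0 [' '] + 1 ≤ (left0.length : Int) := by
    rcases pvRfindGoCases left0 left0.length with h1 | ⟨i, hi, he, hp⟩ <;>
      unfold PySem.Chars.rfind
    · rw [h1]; omega
    · obtain ⟨hilen, _⟩ := (pvPrefixSingle left0 i).mp hp
      rw [he]; constructor <;> omega
  rw [pvSliceTake left0 _ (by omega) hb.2, pvTrimR_eq]

lemma pvRight_eq (right0 : List Char) :
    pvTrimL right0
      = (if 0 ≤ PySem.Chars.find right0 [' ']
         then PySem.List.slice right0 (some (PySem.Chars.find right0 [' '])) none else []) := by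
  rw [pvTrimL_eq]
  by_cases h : 0 ≤ PySem.Chars.find right0 [' ']
  · rw [if_pos h, if_pos h, pvSliceDrop _ _ h (PySem.Chars.find_le_length right0 [' '])]
  · rw [if_neg h, if_neg h]

-- glue: the two folds build the same flattened list
lemma pvJoin_nil (parts : List (List Char)) : PySem.Chars.join [] parts = parts.flatten := by
  induction parts with
  | nil => rfl
  | cons p ps ih =>
    cases ps with
    | nil => simp [PySem.Chars.join, List.intercalate]
    | cons q qs =>
      simp only [PySem.Chars.join, List.intercalate] at ih ⊢
      simp [List.intersperse, ih] at ih ⊢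

lemma pvFoldA (l : List (String × Int × Int)) (f1 f2 f3 : (String × Int × Int) → List Char)
    (acc : List (List Char)) :
    l.foldl (fun acc t => acc ++ [f1 t] ++ [f2 t] ++ [f3 t] ++ [['\n']]) acc
      = acc ++ l.flatMap (fun t => [f1 t, f2 t, f3 t, ['\n']]) := by
  induction l generalizing acc with
  | nil => simp
  | cons t ts ih => simp [List.append_assoc, List.flatMap_def]

lemma pvFlatten_eq (l : List (String × Int × Int)) (fA1 fA3 fB1 fB3 mm : (String × Int × Int) → List Char)
    (h1 : ∀ t, fA1 t = fB1 t) (h3 : ∀ t, fA3 t = fB3 t) :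
    (l.flatMap (fun t => [fA1 t, mm t, fA3 t, ['\n']])).flatten
      = (l.map (fun t => fB1 t ++ mm t ++ fB3 t ++ ['\n'])).flatten := by
  induction l with
  | nil => rfl
  | cons t ts ih =>
    simp only [List.flatMap_cons, List.map_cons, List.flatten_append, List.flatten_cons]
    rw [ih, h1, h3]
    simp [List.append_assoc]

lemma main_eq (input_string : String) (found_words : List (String × Int × Int)) :
    replace_words_in_text input_string found_words = replace_words_in_text_alt input_string found_words := by
  unfold replace_words_in_text replace_words_in_text_alt
  simp only []
  rw [pvJoin_nil, pvJoin_nil, pvFoldA,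
    PySem.List.foldl_append_singleton_eq_map, List.nil_append, List.nil_append]
  refine congrArg _ (pvFlatten_eq _ _ _ _ _ _ ?_ ?_) <;> intro t
  · exact pvLeft_eq _
  · exact pvRight_eq _


-- ===== VERDICT (by name: the statement is the Claim_ definition above) =====
theorem replace_words_in_text_spec : Claim_equal_replace_words_in_text := by
  intro input_string found_words _
  unfold Spec_replace_words_in_text
  exact main_eq input_string found_words
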